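-- pv_equiv track=rewrite | github.com/pysec-se/airecon | airecon/proxy/agent/captcha_solver.py | _guess_input_names
-- ===== SOURCE A (Python) =====
-- def _guess_input_names(type_hint: str) -> list[str]:
--
--     t = type_hint.lower()
--     names: list[str] = []
--     if "recaptcha" in t:
--         names.append("g-recaptcha-response")
--     if "hcaptcha" in t:
--         names.append("h-captcha-response")
--     if "turnstile" in t or "cloudflare" in t:
--         names.append("cf-turnstile-response")
--     names.append("captcha-token")
--     names.append("captcha_response")
--     names.append("validation_token")
--     # De-duplicate while preserving order
--     seen = set()
--     deduped = []
--     for n in names: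
--         if n not in seen:
--             seen.add(n)
--             deduped.append(n)
--     return deduped
-- ===== SOURCE B (Python) =====
-- # All 8 possible outputs, precomputed; indexed by a 3-bit mask of the hint tests.
-- _SUFFIX = ["captcha-token", "captcha_response", "validation_token"]
-- _TABLE = [
--     ([["g-recaptcha-response"] if m & 1 else [],
--       ["h-captcha-response"] if m & 2 else [],
--       ["cf-turnstile-response"] if m & 4 else []])
--     for m in range(8)
-- ]
-- _TABLE = [[n for part in row for n in part] + _SUFFIX for row in _TABLE]
--
-- def _guess_input_names(type_hint: str) -> list[str]:
--     t = type_hint.lower()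
--     mask = (("recaptcha" in t)
--             | (("hcaptcha" in t) << 1)
--             | ((("turnstile" in t) or ("cloudflare" in t)) << 2))
--     return list(_TABLE[mask])
-- ===== Notes on version B (the rewrite author's own statement) =====
-- stated objective: alternative
-- what changed: Replaced the if/append chain plus set-based dedup loop by a single table lookup: the three substring tests form a 3-bit mask indexing a precomputed table of all 8 possible complete outputs (the dedup pass was a no-op since the six names are pairwise distinct).
import Mathlib
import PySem

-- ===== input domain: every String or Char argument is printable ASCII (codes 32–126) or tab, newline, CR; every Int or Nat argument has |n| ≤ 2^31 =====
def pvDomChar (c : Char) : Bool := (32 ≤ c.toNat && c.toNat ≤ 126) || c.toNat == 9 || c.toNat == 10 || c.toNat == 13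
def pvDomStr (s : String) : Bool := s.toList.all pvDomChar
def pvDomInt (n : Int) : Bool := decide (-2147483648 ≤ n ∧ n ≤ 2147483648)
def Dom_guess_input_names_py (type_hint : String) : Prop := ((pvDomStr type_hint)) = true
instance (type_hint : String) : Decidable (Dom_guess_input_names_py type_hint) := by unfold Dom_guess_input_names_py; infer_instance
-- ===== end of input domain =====

-- B replaces the if/append chain + set dedup by a 3-bit mask lookup into a precomputed table of all 8 outputs (dedup was a no-op: the six names are pairwise distinct).


-- ===== PORT A =====
def guess_input_names_py (type_hint : String) : List String :=
  let t := PySem.Str.lower type_hint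
  let names : List String := []
  let names := if PySem.Str.isIn "recaptcha" t then names ++ ["g-recaptcha-response"] else names
  let names := if PySem.Str.isIn "hcaptcha" t then names ++ ["h-captcha-response"] else names
  let names := if PySem.Str.isIn "turnstile" t || PySem.Str.isIn "cloudflare" t then names ++ ["cf-turnstile-response"] else names
  let names := names ++ ["captcha-token"]
  let names := names ++ ["captcha_response"]
  let names := names ++ ["validation_token"]
  -- de-duplication loop: (seen, deduped) threaded through the fold
  let res := names.foldl (fun (p : PySem.Set String × List String) n =>
    if p.1.contains n then p else (p.1.add n, p.2 ++ [n])) (PySem.Set.empty, [])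
  res.2

-- ===== PORT B =====
-- _TABLE: all 8 complete outputs, built by the same comprehension over masks 0..7 as Source B
def pvSuffix : List String := ["captcha-token", "captcha_response", "validation_token"]
def pvTable : List (List String) :=
  (List.range 8).map (fun m =>
    ([(if m &&& 1 ≠ 0 then ["g-recaptcha-response"] else []),
      (if m &&& 2 ≠ 0 then ["h-captcha-response"] else []),
      (if m &&& 4 ≠ 0 then ["cf-turnstile-response"] else [])].flatten) ++ pvSuffix)

def guess_input_names_py_alt (type_hint : String) : List String :=
  let t := PySem.Str.lower type_hint
  let mask : Nat :=
    (if PySem.Str.isIn "recaptcha" t then 1 else 0) |||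
    ((if PySem.Str.isIn "hcaptcha" t then 1 else 0) <<< 1) |||
    ((if PySem.Str.isIn "turnstile" t || PySem.Str.isIn "cloudflare" t then 1 else 0) <<< 2)
  pvTable.getD mask []   -- index always in range 0..7

-- ===== PRECONDITION & SPEC =====
def Spec_guess_input_names_py (type_hint : String) (out : List String) : Prop := out = guess_input_names_py_alt type_hint
instance (type_hint : String) (out : List String) : Decidable (Spec_guess_input_names_py type_hint out) := by unfold Spec_guess_input_names_py; infer_instance

-- ===== CLAIM =====
def Claim_equal_guess_input_names_py : Prop := ∀ (type_hint : String), Dom_guess_input_names_py type_hint → Spec_guess_input_names_py type_hint (guess_input_names_py type_hint)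

-- ===== LEMMAS AND PROOFS =====

-- ===== VERDICT =====
theorem guess_input_names_py_spec : Claim_equal_guess_input_names_py := by
  intro th _
  unfold Spec_guess_input_names_py
  simp only [guess_input_names_py, guess_input_names_py_alt]
  generalize PySem.Str.isIn "recaptcha" (PySem.Str.lower th) = b1
  generalize PySem.Str.isIn "hcaptcha" (PySem.Str.lower th) = b2
  generalize PySem.Str.isIn "turnstile" (PySem.Str.lower th) = b3
  generalize PySem.Str.isIn "cloudflare" (PySem.Str.lower th) = b4
  cases b1 <;> cases b2 <;> cases b3 <;> cases b4 <;> decide
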